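-- pv_equiv track=rewrite | github.com/BanaBlack228/DZ26 | DZ26.py | calculate_sum_and_product_of_digits
-- ===== SOURCE A (Python) =====
-- def calculate_sum_and_product_of_digits(number):
--     if 100 <= number <= 999:
--
--         digits = [int(digit) for digit in str(number)]
--         digit_sum = sum(digits)
--         digit_product = 1
--         for digit in digits:
--             digit_product *= digit
--         return f"Сумма цифр = {digit_sum}, Произведение цифр = {digit_product}"
--     else:
--         return "Введите положительное трехзначное число."
-- ===== SOURCE B (Python) =====
-- def calculate_sum_and_product_of_digits(number):
--     if 100 <= number <= 999:
--         h, rest = divmod(number, 100)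
--         t, u = divmod(rest, 10)
--         return f"Сумма цифр = {h + t + u}, Произведение цифр = {h * t * u}"
--     else:
--         return "Введите положительное трехзначное число."
-- ===== Notes on version B (the rewrite author's own statement) =====
-- stated objective: idiomatic
-- what changed: Replaces the str()-conversion, per-character int() list and product loop with direct divmod arithmetic extracting hundreds, tens and units digits.
import Mathlib
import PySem

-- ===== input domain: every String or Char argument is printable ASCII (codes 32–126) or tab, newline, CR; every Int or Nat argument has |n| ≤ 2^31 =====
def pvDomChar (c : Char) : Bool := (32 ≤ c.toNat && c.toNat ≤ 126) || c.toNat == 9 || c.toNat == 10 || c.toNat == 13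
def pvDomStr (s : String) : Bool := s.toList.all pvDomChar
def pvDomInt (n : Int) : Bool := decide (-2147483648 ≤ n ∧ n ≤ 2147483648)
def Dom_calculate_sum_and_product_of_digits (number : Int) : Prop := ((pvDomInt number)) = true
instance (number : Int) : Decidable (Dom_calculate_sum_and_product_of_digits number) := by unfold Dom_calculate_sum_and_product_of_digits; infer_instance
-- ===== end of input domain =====

-- B replaces A's string-conversion / per-character int() / product loop by direct divmod digit arithmetic (idiomatic; same O(1) cost).


-- ===== PORT A =====
def calculate_sum_and_product_of_digits (number : Int) : String :=
  if 100 ≤ number ∧ number ≤ 999 then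
    -- [int(digit) for digit in str(number)]; int(c) for a single digit char is its code minus 48 (exact: str(number) here is three ASCII digits)
    let digits : List Int := (PySem.Int.toStr number).toList.map (fun c => ((c.toNat : Int) - 48))
    let digit_sum : Int := digits.sum
    let digit_product : Int := digits.foldl (fun acc d => acc * d) 1
    "Сумма цифр = " ++ PySem.Int.toStr digit_sum ++ ", Произведение цифр = " ++ PySem.Int.toStr digit_product
  else
    "Введите положительное трехзначное число."

-- ===== PORT B =====
def calculate_sum_and_product_of_digits_alt (number : Int) : String :=
  if 100 ≤ number ∧ number ≤ 999 then
    let h := PySem.Int.floordiv number 100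
    let rest := PySem.Int.mod number 100
    let t := PySem.Int.floordiv rest 10
    let u := PySem.Int.mod rest 10
    "Сумма цифр = " ++ PySem.Int.toStr (h + t + u) ++ ", Произведение цифр = " ++ PySem.Int.toStr (h * t * u)
  else
    "Введите положительное трехзначное число."

-- ===== PRECONDITION & SPEC =====
def Spec_calculate_sum_and_product_of_digits (number : Int) (out : String) : Prop := out = calculate_sum_and_product_of_digits_alt number
instance (number : Int) (out : String) : Decidable (Spec_calculate_sum_and_product_of_digits number out) := by unfold Spec_calculate_sum_and_product_of_digits; infer_instance

-- ===== CLAIM (what is proved, stated in full; the proofs are below) =====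
def Claim_equal_calculate_sum_and_product_of_digits : Prop := ∀ (number : Int), Dom_calculate_sum_and_product_of_digits number → Spec_calculate_sum_and_product_of_digits number (calculate_sum_and_product_of_digits number)

-- ===== LEMMAS AND PROOFS =====

-- Three unfoldings of Nat.toDigitsCore for a three-digit number.
lemma toDigitsCore3 (f m : Nat) (hf : 3 ≤ f) (h1 : 100 ≤ m) (h2 : m < 1000) (ds : List Char) :
    Nat.toDigitsCore 10 f m ds =
      Nat.digitChar (m / 100) :: Nat.digitChar (m / 10 % 10) :: Nat.digitChar (m % 10) :: ds := by
  obtain ⟨g, rfl⟩ : ∃ g, f = g + 3 := ⟨f - 3, by omega⟩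
  rw [show g + 3 = (g + 2) + 1 from rfl, Nat.toDigitsCore]
  rw [if_neg (by omega)]
  rw [show g + 2 = (g + 1) + 1 from rfl, Nat.toDigitsCore]
  rw [if_neg (by omega)]
  rw [Nat.toDigitsCore]
  rw [if_pos (by omega)]
  have e1 : m / 10 / 10 = m / 100 := by omega
  have e2 : m / 100 % 10 = m / 100 := by omega
  rw [e1, e2]

-- str(m) for a three-digit m is exactly its three digit characters.
lemma toChars3 (n : Int) (h1 : 100 ≤ n) (h2 : n ≤ 999) :
    PySem.Int.toChars n =
      [Nat.digitChar (n.toNat / 100), Nat.digitChar (n.toNat / 10 % 10), Nat.digitChar (n.toNat % 10)] := by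
  unfold PySem.Int.toChars
  rw [if_neg (by omega)]
  unfold Nat.toDigits
  exact toDigitsCore3 _ _ (by omega) (by omega) (by omega) []

lemma digitChar_val (d : Nat) (hd : d ≤ 9) : ((Nat.digitChar d).toNat : Int) - 48 = (d : Int) := by
  interval_cases d <;> decide

-- ===== VERDICT (by name: the statement is the Claim_ definition above) =====

theorem calculate_sum_and_product_of_digits_spec : Claim_equal_calculate_sum_and_product_of_digits := by
  intro n _
  unfold Spec_calculate_sum_and_product_of_digits
  unfold calculate_sum_and_product_of_digits calculate_sum_and_product_of_digits_alt
  by_cases h : 100 ≤ n ∧ n ≤ 999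
  · rw [if_pos h, if_pos h]
    obtain ⟨h1, h2⟩ := h
    rw [PySem.Int.toList_toStr, toChars3 n h1 h2]
    simp only [List.map_cons, List.map_nil, List.sum_cons, List.sum_nil, List.foldl_cons,
      List.foldl_nil]
    rw [digitChar_val _ (by omega), digitChar_val _ (by omega), digitChar_val _ (by omega)]
    unfold PySem.Int.floordiv PySem.Int.mod
    rw [Int.fdiv_eq_ediv, Int.fdiv_eq_ediv, Int.fmod_eq_emod, Int.fmod_eq_emod]
    simp only [if_pos (Or.inl (by norm_num : (0:Int) ≤ 100)),
      if_pos (Or.inl (by norm_num : (0:Int) ≤ 10)), sub_zero]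
    have c1 : ((n.toNat / 100 : Nat) : Int) = n / 100 := by omega
    have c10 : ((n.toNat / 10 : Nat) : Int) = n / 10 := by omega
    have c2 : ((n.toNat / 10 % 10 : Nat) : Int) = n % 100 / 10 := by
      push_cast
      rw [Int.toNat_of_nonneg (by omega : (0:Int) ≤ n)]
      omega
    have c3 : ((n.toNat % 10 : Nat) : Int) = n % 100 % 10 := by omega
    rw [c1, c2, c3]
    norm_num
    ring_nf
  · rw [if_neg h, if_neg h]
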